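-- pv_equiv track=rewrite | github.com/navaneethakumar-balasubramanian/dcrhino_lib | dcrhino/collection/IDEtoSEGY/rhino.py | StandardString
-- ===== SOURCE A (Python) =====
-- def StandardString(s):
--     if type(s) is str:
--         s = s.replace("_"," ")
--         components = s.split(" ")
--         clean_components=[]
--         string=""
--         for ch in components:
--             word = ''.join(e for e in ch if (e.isalnum() or (e in ['&','.'])))
--             #if(word.isalnum()):
--             clean_components.append(word)
--         for i,c in enumerate(clean_components):
--             string += c
--             if i<len(clean_components)-1:
--                 string+= "_"
--         return string.upper()
--     else:
--         raise TypeError("Argument needs to be a string")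
-- ===== SOURCE B (Python) =====
-- def StandardString(s):
--     if type(s) is str:
--         out = []
--         for ch in s:
--             if ch == ' ' or ch == '_':
--                 out.append('_')
--             elif ch.isalnum() or ch in ('&', '.'):
--                 out.append(ch)
--         return ''.join(out).upper()
--     else:
--         raise TypeError("Argument needs to be a string")
-- ===== Notes on version B (the rewrite author's own statement) =====
-- stated objective: simpler
-- what changed: Replaced A's replace/split-on-space/per-word-filter/enumerate-join pipeline with a single left-to-right pass over the original string that emits one underscore per separator character, keeps alphanumerics and the two allowed punctuation characters, drops everything else, and uppercases at the end.
import Mathlib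
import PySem

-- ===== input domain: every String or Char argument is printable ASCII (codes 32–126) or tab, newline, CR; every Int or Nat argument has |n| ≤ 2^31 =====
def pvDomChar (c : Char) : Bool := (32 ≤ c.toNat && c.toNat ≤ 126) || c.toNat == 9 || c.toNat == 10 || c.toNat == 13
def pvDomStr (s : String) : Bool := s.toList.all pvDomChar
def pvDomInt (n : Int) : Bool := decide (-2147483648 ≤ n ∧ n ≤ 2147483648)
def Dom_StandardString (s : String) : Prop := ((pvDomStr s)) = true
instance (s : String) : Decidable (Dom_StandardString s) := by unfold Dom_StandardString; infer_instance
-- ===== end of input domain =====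

-- B replaces A's replace/split/per-word-filter/enumerate-join pipeline by a single left-to-right
-- pass that emits one underscore per separator and keeps or drops each other character (objective: simpler).
-- The TypeError branch for non-str arguments is outside the type convention (s : String).

-- ===== PORT A =====
def StandardString (s : String) : String :=
  let s1 := PySem.Chars.replace s.toList ['_'] [' ']
  let components := PySem.Chars.splitOn s1 [' ']
  -- ''.join(e for e in ch if cond) over the characters of ch is the filter of ch
  let cleanComponents := components.foldl
    (fun acc ch => acc ++ [ch.filter (fun e => PySem.Chars.isalnum e || e == '&' || e == '.')]) []
  let str := (PySem.List.enumerate cleanComponents 0).foldl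
    (fun acc ic =>
      if ic.1 < (cleanComponents.length : Int) - 1 then acc ++ ic.2 ++ ['_'] else acc ++ ic.2) []
  String.ofList (PySem.Chars.upper str)

-- ===== PORT B =====
def StandardString_alt (s : String) : String :=
  String.ofList (PySem.Chars.upper (s.toList.foldl
    (fun acc c =>
      if c == ' ' || c == '_' then acc ++ ['_']
      else if PySem.Chars.isalnum c || c == '&' || c == '.' then acc ++ [c]
      else acc) []))

-- ===== PRECONDITION & SPEC =====
def Spec_StandardString (s : String) (out : String) : Prop := out = StandardString_alt s
instance (s : String) (out : String) : Decidable (Spec_StandardString s out) := by unfold Spec_StandardString; infer_instance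

-- ===== CLAIM (what is proved, stated in full; the proofs are below) =====
def Claim_equal_StandardString : Prop := ∀ (s : String), Dom_StandardString s → Spec_StandardString s (StandardString s)

-- ===== LEMMAS AND PROOFS =====

-- keep predicate shared by both ports
def pvKeep (c : Char) : Bool := PySem.Chars.isalnum c || c == '&' || c == '.'

-- character substitution performed by A's s.replace("_", " ")
def pvSub (c : Char) : Char := if c == '_' then ' ' else c

-- per-character contribution after substitution (A's view)
def pvG (c : Char) : List Char := if c == ' ' then ['_'] else if pvKeep c then [c] else []

-- per-character contribution of B's single pass
def pvH (c : Char) : List Char :=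
  if c == ' ' || c == '_' then ['_'] else if pvKeep c then [c] else []

-- structural model of splitting on a single space
def pvSplit : List Char → List Char → List (List Char)
  | [], cur => [cur.reverse]
  | c :: rest, cur => if c == ' ' then cur.reverse :: pvSplit rest [] else pvSplit rest (c :: cur)

lemma pvReplaceGo (l : List Char) : ∀ (fuel : Nat) (acc : List Char), l.length ≤ fuel →
    PySem.Chars.replace.go ['_'] [' '] fuel l acc = acc.reverse ++ l.map pvSub := by
  induction l with
  | nil => intro fuel acc _; cases fuel <;> simp [PySem.Chars.replace.go]
  | cons c t ih =>
    intro fuel acc h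
    cases fuel with
    | zero => simp at h
    | succ fuel =>
      rw [PySem.Chars.replace.go]
      by_cases hc : c = '_'
      · subst hc
        simp only [List.isPrefixOf, BEq.rfl, Bool.true_and, if_pos]
        rw [show List.drop ['_'].length ('_' :: t) = t from rfl,
            show [' '].reverse ++ acc = ' ' :: acc from rfl]
        rw [ih fuel _ (by simpa using Nat.le_of_succ_le_succ h)]
        simp [pvSub]
      · have : List.isPrefixOf ['_'] (c :: t) = false := by
          simp [List.isPrefixOf]; exact fun h' => hc h'.symm
        rw [this]
        simp only [Bool.false_eq_true, if_false]
        rw [ih fuel _ (by simpa using Nat.le_of_succ_le_succ h)]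
        simp [pvSub, hc]

lemma pvReplaceEq (cs : List Char) :
    PySem.Chars.replace cs ['_'] [' '] = cs.map pvSub := by
  simp [PySem.Chars.replace]
  simpa using pvReplaceGo cs cs.length [] le_rfl

lemma pvSplitGo (l : List Char) : ∀ (fuel : Nat) (cur : List Char) (acc : List (List Char)),
    l.length ≤ fuel →
    PySem.Chars.splitOn.go [' '] fuel l cur acc = acc.reverse ++ pvSplit l cur := by
  induction l with
  | nil => intro fuel cur acc _; cases fuel <;> simp [PySem.Chars.splitOn.go, pvSplit]
  | cons c t ih =>
    intro fuel cur acc h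
    cases fuel with
    | zero => simp at h
    | succ fuel =>
      rw [PySem.Chars.splitOn.go]
      by_cases hc : c = ' '
      · subst hc
        simp only [List.isPrefixOf, BEq.rfl, Bool.true_and, if_pos]
        rw [show List.drop (List.length [' ']) (' ' :: t) = t from rfl]
        rw [ih fuel _ _ (by simpa using Nat.le_of_succ_le_succ h)]
        simp [pvSplit]
      · have : List.isPrefixOf [' '] (c :: t) = false := by
          simp [List.isPrefixOf]; exact fun h' => hc h'.symm
        rw [this]
        simp only [Bool.false_eq_true, if_false]
        rw [ih fuel _ _ (by simpa using Nat.le_of_succ_le_succ h)]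
        simp [pvSplit, hc]

lemma pvSplitEq (cs : List Char) :
    PySem.Chars.splitOn cs [' '] = pvSplit cs [] := by
  simpa [PySem.Chars.splitOn] using
    pvSplitGo cs (cs.length + 1) [] [] (Nat.le_succ _)

lemma pvSplit_ne_nil (l cur : List Char) : pvSplit l cur ≠ [] := by
  induction l generalizing cur with
  | nil => simp [pvSplit]
  | cons c t ih => by_cases hc : c = ' ' <;> simp [pvSplit, hc, ih]

lemma pvJoinSplit (l : List Char) : ∀ cur : List Char,
    PySem.Chars.join ['_'] ((pvSplit l cur).map (List.filter pvKeep)) =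
      cur.reverse.filter pvKeep ++ l.flatMap pvG := by
  induction l with
  | nil => intro cur; simp [pvSplit, PySem.Chars.join_singleton]
  | cons c t ih =>
    intro cur
    by_cases hc : c = ' '
    · subst hc
      rw [show pvSplit (' ' :: t) cur = cur.reverse :: pvSplit t [] from by simp [pvSplit]]
      obtain ⟨y, ys, hy⟩ : ∃ y ys, pvSplit t [] = y :: ys := by
        cases h : pvSplit t [] with
        | nil => exact absurd h (pvSplit_ne_nil t [])
        | cons y ys => exact ⟨y, ys, rfl⟩
      rw [List.map_cons, hy, List.map_cons, PySem.Chars.join_cons_cons]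
      have := ih []
      rw [hy] at this
      simp only [List.map_cons] at this
      rw [this]
      simp [pvG]
    · rw [show pvSplit (c :: t) cur = pvSplit t (c :: cur) from by simp [pvSplit, hc]]
      rw [ih (c :: cur)]
      simp only [List.reverse_cons, List.filter_append, List.flatMap_cons]
      by_cases hk : pvKeep c <;> simp [hk, pvG, hc]

lemma pvEnumJoin (parts : List (List Char)) : ∀ (s : Int) (pre : List Char) (N : Int),
    N = s + parts.length →
    (PySem.List.enumerate parts s).foldl
      (fun acc ic =>
        if ic.1 < N - 1 then acc ++ ic.2 ++ ['_'] else acc ++ ic.2) pre =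
      pre ++ PySem.Chars.join ['_'] parts := by
  induction parts with
  | nil => intro s pre N _; simp [PySem.List.enumerate_nil, PySem.Chars.join_nil]
  | cons c rest ih =>
    intro s pre N hN
    rw [PySem.List.enumerate_cons, List.foldl_cons]
    cases rest with
    | nil =>
      have : ¬ (s < N - 1) := by simp at hN; omega
      simp only [this, if_false]
      simp [PySem.List.enumerate_nil, PySem.Chars.join_singleton]
    | cons r rs =>
      have hlt : s < N - 1 := by simp at hN; omega
      simp only [hlt, if_true]
      rw [ih (s + 1) _ N (by simp at hN ⊢; omega)]
      rw [PySem.Chars.join_cons_cons]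
      simp

lemma pvBFold (cs : List Char) : ∀ acc : List Char,
    cs.foldl
      (fun acc c =>
        if c == ' ' || c == '_' then acc ++ ['_']
        else if PySem.Chars.isalnum c || c == '&' || c == '.' then acc ++ [c]
        else acc) acc = acc ++ cs.flatMap pvH := by
  induction cs with
  | nil => intro acc; simp
  | cons c t ih =>
    intro acc
    rw [List.foldl_cons, ih]
    simp only [List.flatMap_cons, pvH, pvKeep]
    by_cases h1 : (c == ' ' || c == '_') = true <;> by_cases h2 : (PySem.Chars.isalnum c || c == '&' || c == '.') = true <;>
      simp [h1, h2]

lemma pvGsubH (c : Char) : pvG (pvSub c) = pvH c := by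
  by_cases hc : c = '_'
  · subst hc; simp [pvSub, pvG, pvH]
  · by_cases hs : c = ' '
    · subst hs; simp [pvSub, pvG, pvH]
    · simp [pvSub, pvG, pvH, hc, hs]

-- ===== VERDICT (by name: the statement is the Claim_ definition above) =====
theorem StandardString_spec : Claim_equal_StandardString := by
  intro s _
  show StandardString s = StandardString_alt s
  simp only [StandardString, StandardString_alt]
  rw [pvBFold s.toList []]
  congr 1
  rw [pvReplaceEq, pvSplitEq]
  rw [PySem.List.foldl_append_singleton_eq_map]
  rw [pvEnumJoin _ 0 [] _ (by simp)]
  rw [show (List.filter fun e => PySem.Chars.isalnum e || e == '&' || e == '.')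
        = List.filter pvKeep from rfl]
  simp only [List.nil_append]
  rw [pvJoinSplit (s.toList.map pvSub) []]
  simp only [List.reverse_nil, List.filter_nil, List.nil_append, List.flatMap_map]
  exact congrArg PySem.Chars.upper (List.flatMap_congr (fun c _ => pvGsubH c))
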